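-- pv_equiv track=rewrite | github.com/gururajraop/Sudoku-KR | cnf_encoding.py | k_SAT
-- ===== SOURCE A (Python) =====
-- def reduce_clause(clause, k, var_count):
--     clause_1 = clause[:(k - 1)]
--     clause_2 = clause[(k - 1):]
--     clause_1.extend([var_count + 1])
--     clause_2.extend([-1 * (var_count + 1)])
--
--     return clause_1, clause_2
--
-- def k_SAT(dim, code, k):
--     encode = []
--     variables = dim ** 3
--     for clause in code:
--         while len(clause) > k:
--             clause_1, clause_2 = reduce_clause(clause, k, variables)
--             clause = clause_2[:]
--             encode.append(clause_1)
--             variables += 1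
--         encode.append(clause)
--
--     return encode, variables
-- ===== SOURCE B (Python) =====
-- def encode_clause(clause, k, variables):
--     # The number of auxiliary variables is known in closed form, so we extend
--     # the clause with all negated aux literals at once and emit fixed
--     # (k-1)-wide windows in a single chunking pass.
--     L = len(clause)
--     if L <= k:
--         return [clause], variables
--     m = -((L - k) // (2 - k))  # ceil((L - k) / (k - 2)) auxiliary variables
--     ext = clause + [-(variables + j) for j in range(1, m + 1)]
--     chunks = []
--     for i in range(m):
--         chunks.append(ext[i * (k - 1):(i + 1) * (k - 1)] + [variables + i + 1])
--     chunks.append(ext[m * (k - 1):])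
--     return chunks, variables + m
--
-- def k_SAT(dim, code, k):
--     encode = []
--     variables = dim ** 3
--     for clause in code:
--         chunks, variables = encode_clause(clause, k, variables)
--         encode.extend(chunks)
--     return encode, variables
-- ===== Notes on version B (the rewrite author's own statement) =====
-- stated objective: alternative
-- what changed: Instead of repeatedly re-slicing the shrinking remainder clause in a while loop, B computes the number of auxiliary variables per clause in closed form, appends all negated aux literals at once, and emits the (k-1)-wide windows in a single chunking pass.
import Mathlib
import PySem

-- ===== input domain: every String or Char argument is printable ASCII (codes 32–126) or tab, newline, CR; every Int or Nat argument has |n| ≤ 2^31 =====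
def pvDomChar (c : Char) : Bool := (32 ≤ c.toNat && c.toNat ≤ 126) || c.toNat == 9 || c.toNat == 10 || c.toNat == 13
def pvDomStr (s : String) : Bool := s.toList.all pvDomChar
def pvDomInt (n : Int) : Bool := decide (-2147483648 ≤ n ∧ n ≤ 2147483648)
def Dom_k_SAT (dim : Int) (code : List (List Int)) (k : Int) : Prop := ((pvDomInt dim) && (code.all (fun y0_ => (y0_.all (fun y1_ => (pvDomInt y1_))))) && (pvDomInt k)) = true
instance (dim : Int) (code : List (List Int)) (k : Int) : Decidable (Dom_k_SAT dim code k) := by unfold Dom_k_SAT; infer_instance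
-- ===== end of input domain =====

-- B replaces A's while loop of repeated remainder re-slicing by a closed-form aux-variable
-- count and one chunking pass per clause; equivalence is proved on Pre_ (where A terminates).

-- ===== PORT A =====
def reduceClause (clause : List Int) (k : Int) (varCount : Int) : List Int × List Int :=
  (PySem.List.slice clause none (some (k - 1)) ++ [varCount + 1],
   PySem.List.slice clause (some (k - 1)) none ++ [-1 * (varCount + 1)])

-- the 'while len(clause) > k' loop; the fuel only makes the recursion total
-- (inside Pre_k_SAT it never runs out, since each pass shortens the clause)
def kSATwhile : Nat → List Int → Int → Int → List (List Int) → List (List Int) × Int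
  | 0, clause, _, vars, acc => (acc ++ [clause], vars)
  | fuel + 1, clause, k, vars, acc =>
    if ((clause.length : Int)) > k then
      let p := reduceClause clause k vars
      kSATwhile fuel p.2 k (vars + 1) (acc ++ [p.1])
    else (acc ++ [clause], vars)

def k_SAT (dim : Int) (code : List (List Int)) (k : Int) : List (List Int) × Int :=
  code.foldl (fun st clause => kSATwhile clause.length clause k st.2 st.1) ([], dim ^ 3)

-- ===== PORT B =====
def encodeClause (clause : List Int) (k : Int) (vars : Int) : List (List Int) × Int :=
  let L : Int := (clause.length : Int)
  if L ≤ k then ([clause], vars)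
  else
    let m : Int := -(PySem.Int.floordiv (L - k) (2 - k))
    let ext : List Int := clause ++ (PySem.List.pyRange 1 (m + 1) 1).map (fun j => -(vars + j))
    let chunks : List (List Int) := (PySem.List.pyRange 0 m 1).foldl
      (fun acc i => acc ++ [PySem.List.slice ext (some (i * (k - 1))) (some ((i + 1) * (k - 1))) ++ [vars + i + 1]]) []
    (chunks ++ [PySem.List.slice ext (some (m * (k - 1))) none], vars + m)

def k_SAT_alt (dim : Int) (code : List (List Int)) (k : Int) : List (List Int) × Int :=
  code.foldl (fun st clause =>
    let r := encodeClause clause k st.2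
    (st.1 ++ r.1, r.2)) ([], dim ^ 3)

-- ===== PRECONDITION & SPEC =====
-- Pre_ excludes exactly the inputs on which A's while loop never terminates
-- (k ≤ 2 together with some clause longer than k): A returns on no such input.
def Pre_k_SAT (dim : Int) (code : List (List Int)) (k : Int) : Prop :=
  3 ≤ k ∨ ∀ c ∈ code, (c.length : Int) ≤ k
instance (dim : Int) (code : List (List Int)) (k : Int) : Decidable (Pre_k_SAT dim code k) := by unfold Pre_k_SAT; infer_instance

def pvWitness_k_SAT : Int × List (List Int) × Int := (2, [[1, -2, 3, 4, 5], [6, 7]], 3)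

def Spec_k_SAT (dim : Int) (code : List (List Int)) (k : Int) (out : List (List Int) × Int) : Prop := out = k_SAT_alt dim code k
instance (dim : Int) (code : List (List Int)) (k : Int) (out : List (List Int) × Int) : Decidable (Spec_k_SAT dim code k out) := by unfold Spec_k_SAT; infer_instance

-- ===== CLAIM (what is proved, stated in full; the proofs are below) =====
def Claim_equal_k_SAT : Prop := ∀ (dim : Int) (code : List (List Int)) (k : Int), Dom_k_SAT dim code k → Pre_k_SAT dim code k → Spec_k_SAT dim code k (k_SAT dim code k)

-- ===== LEMMAS AND PROOFS =====


theorem pv_flatten_single {α β : Type} (g : α → List β) (l : List α) :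
    List.flatMap (fun x => [g x]) l = l.map g := by
  induction l with
  | nil => rfl
  | cons x xs ih => simp [List.flatMap_cons, ih]

theorem pv_chunks_eq_map (ext : List Int) (k vars m : Int) :
    (PySem.List.pyRange 0 m 1).foldl
      (fun acc i => acc ++ [PySem.List.slice ext (some (i * (k - 1))) (some ((i + 1) * (k - 1))) ++ [vars + i + 1]]) []
    = (PySem.List.pyRange 0 m 1).map
      (fun i => PySem.List.slice ext (some (i * (k - 1))) (some ((i + 1) * (k - 1))) ++ [vars + i + 1]) := by
  rw [PySem.List.foldl_append_eq_flatMap, pv_flatten_single]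
  rfl

theorem pv_slice_shift (pre xs : List Int) (a b : Int) (ha : 0 ≤ a) (hb : 0 ≤ b) :
    PySem.List.slice (pre ++ xs) (some ((pre.length : Int) + a)) (some ((pre.length : Int) + b))
      = PySem.List.slice xs (some a) (some b) := by
  rw [PySem.List.slice_toNat _ (by positivity) (by positivity),
      PySem.List.slice_toNat _ ha hb,
      Int.toNat_add (by positivity) ha, Int.toNat_add (by positivity) hb]
  simp only [Int.toNat_natCast]
  rw [List.drop_append]
  rw [List.drop_eq_nil_of_le (by omega)]
  simp only [List.nil_append]
  have h1 : pre.length + a.toNat - pre.length = a.toNat := by omega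
  have h2 : pre.length + b.toNat - (pre.length + a.toNat) = b.toNat - a.toNat := by omega
  rw [h1, h2]

theorem pv_slice_shift_from (pre xs : List Int) (a : Int) (ha : 0 ≤ a) :
    PySem.List.slice (pre ++ xs) (some ((pre.length : Int) + a)) none
      = PySem.List.slice xs (some a) none := by
  rw [PySem.List.slice_from _ (by positivity), PySem.List.slice_from _ ha,
      Int.toNat_add (by positivity) ha]
  simp only [Int.toNat_natCast]
  rw [List.drop_append, List.drop_eq_nil_of_le (by omega)]
  have h1 : pre.length + a.toNat - pre.length = a.toNat := by omega
  rw [h1]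
  simp

theorem pv_ceil_iff (a d q : Int) (hd : 0 < d) :
    -(PySem.Int.floordiv a (-d)) = q ↔ (q - 1) * d < a ∧ a ≤ q * d := by
  have h : PySem.Int.floordiv a (-d) = PySem.Int.floordiv (-a) d := by
    rw [← PySem.Int.floordiv_neg_neg (-a) d, neg_neg]
  rw [h]
  exact PySem.Int.neg_floordiv_neg_eq_iff_of_pos hd

theorem pv_m_eq (L k q : Int) (hk : 3 ≤ k) (h1 : (q - 1) * (k - 2) < L - k) (h2 : L - k ≤ q * (k - 2)) :
    -(PySem.Int.floordiv (L - k) (2 - k)) = q := by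
  have e : (2 - k) = -(k - 2) := by ring
  rw [e]
  exact (pv_ceil_iff _ _ _ (by omega)).mpr ⟨h1, h2⟩

theorem pv_unroll (clause : List Int) (k vars : Int) (hk : 3 ≤ k)
    (hL : k < (clause.length : Int)) :
    encodeClause clause k vars =
      ((clause.take (k - 1).toNat ++ [vars + 1]) ::
        (encodeClause (clause.drop (k - 1).toNat ++ [-1 * (vars + 1)]) k (vars + 1)).1,
       (encodeClause (clause.drop (k - 1).toNat ++ [-1 * (vars + 1)]) k (vars + 1)).2) := by
  simp only [encodeClause]
  rw [if_neg (by omega)]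
  by_cases h2 : ((clause.drop (k - 1).toNat ++ [-1 * (vars + 1)]).length : Int) ≤ k
  · rw [if_pos h2]
    have hm : -(PySem.Int.floordiv ((clause.length : Int) - k) (2 - k)) = 1 := by
      apply pv_m_eq _ _ 1 hk
      · nlinarith
      · simp only [List.length_append, List.length_drop, List.length_cons, List.length_nil] at h2
        push_cast at h2
        omega
    rw [hm]
    have hr1 : PySem.List.pyRange 1 (1 + 1) 1 = [1] := PySem.List.pyRange_one_singleton 1
    have hr0 : PySem.List.pyRange 0 1 1 = [0] := by
      have h := PySem.List.pyRange_one_singleton 0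
      norm_num at h
      exact h
    rw [hr1, hr0]
    simp only [List.map_cons, List.map_nil, List.foldl_cons, List.foldl_nil, List.nil_append]
    have ht : ((k - 1).toNat : Int) = k - 1 := Int.toNat_of_nonneg (by omega)
    have htL : (k - 1).toNat ≤ clause.length := by omega
    rw [show ((0:Int) * (k - 1)) = 0 by ring, show (((0:Int) + 1) * (k - 1)) = k - 1 by ring,
        show (((1:Int)) * (k - 1)) = k - 1 by ring]
    rw [PySem.List.slice_toNat _ (by omega) (by omega), PySem.List.slice_from _ (by omega)]
    simp only [List.drop_append, Nat.sub_eq_zero_of_le htL, add_zero, neg_one_mul,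
      Int.toNat_zero, List.drop_zero, Nat.sub_zero]
    simp
    omega
  · rw [if_neg h2]
    have ht : (((k - 1).toNat : Nat) : Int) = k - 1 := Int.toNat_of_nonneg (by omega)
    have htL : (k - 1).toNat ≤ clause.length := by omega
    set t := (k - 1).toNat with htdef
    set c2 := clause.drop t ++ [-1 * (vars + 1)] with hc2
    have hlen2 : (c2.length : Int) = (clause.length : Int) - k + 2 := by
      rw [hc2]; simp only [List.length_append, List.length_drop, List.length_cons, List.length_nil]
      push_cast; omega
    set q := -(PySem.Int.floordiv ((c2.length : Int) - k) (2 - k)) with hq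
    have e : (2 - k) = -(k - 2) := by ring
    have hqb : (q - 1) * (k - 2) < (c2.length : Int) - k ∧ (c2.length : Int) - k ≤ q * (k - 2) := by
      refine (pv_ceil_iff _ _ _ (by omega)).mp ?_
      rw [← e]
    have hq1 : 1 ≤ q := by nlinarith [hqb.1, hqb.2]
    have hm : -(PySem.Int.floordiv ((clause.length : Int) - k) (2 - k)) = q + 1 := by
      apply pv_m_eq _ _ _ hk
      · nlinarith [hqb.1, hlen2]
      · nlinarith [hqb.2, hlen2]
    rw [hm]
    have hpre : (List.take t clause).length = t := by
      simp only [List.length_take]; omega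
    have hpreI : ((List.take t clause).length : Int) = k - 1 := by rw [hpre]; exact ht
    have h12 : PySem.List.pyRange 1 2 1 = [1] := by
      have h := PySem.List.pyRange_one_singleton 1; norm_num at h; exact h
    have hshift : (PySem.List.pyRange 2 (q + 1 + 1) 1).map (fun j => -(vars + j))
        = (PySem.List.pyRange 1 (q + 1) 1).map (fun j => -(vars + 1 + j)) := by
      rw [PySem.List.pyRange_one 2 (q + 1 + 1), PySem.List.pyRange_one 1 (q + 1)]
      rw [show ((q + 1 + 1 - 2) : Int) = q by ring, show ((q + 1 - 1) : Int) = q by ring]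
      simp only [List.map_map]
      apply List.map_congr_left
      intro x _
      simp only [Function.comp_apply]
      ring_nf
    have hext : clause ++ (PySem.List.pyRange 1 (q + 1 + 1) 1).map (fun j => -(vars + j))
        = List.take t clause ++ (c2 ++ (PySem.List.pyRange 1 (q + 1) 1).map (fun j => -(vars + 1 + j))) := by
      conv_lhs => rw [← List.take_append_drop t clause]
      rw [PySem.List.pyRange_one_append 1 2 (q + 1 + 1) (by omega) (by omega), List.map_append,
        h12, hshift, hc2]
      simp [List.append_assoc]
      rw [← List.append_assoc, List.take_append_drop]
    rw [hext]
    rw [pv_chunks_eq_map, pv_chunks_eq_map]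
    rw [PySem.List.pyRange_one_cons (show (0:Int) < q + 1 by omega)]
    simp only [List.map_cons, List.cons_append]
    have hhead : PySem.List.slice
          (List.take t clause ++ (c2 ++ List.map (fun j => -(vars + 1 + j)) (PySem.List.pyRange 1 (q + 1) 1)))
          (some (0 * (k - 1))) (some ((0 + 1) * (k - 1))) ++ [vars + 0 + 1]
        = List.take t clause ++ [vars + 1] := by
      rw [show ((0:Int) * (k - 1)) = 0 by ring, show (((0:Int) + 1) * (k - 1)) = k - 1 by ring]
      rw [PySem.List.slice_toNat _ (by omega) (by omega)]
      simp only [Int.toNat_zero, List.drop_zero, Nat.sub_zero, add_zero]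
      rw [List.take_append_of_le_length (by omega : (k - 1).toNat ≤ (List.take t clause).length),
          List.take_of_length_le (by omega)]
    have hmid : List.map
          (fun i => PySem.List.slice
              (List.take t clause ++ (c2 ++ List.map (fun j => -(vars + 1 + j)) (PySem.List.pyRange 1 (q + 1) 1)))
              (some (i * (k - 1))) (some ((i + 1) * (k - 1))) ++ [vars + i + 1])
          (PySem.List.pyRange (0 + 1) (q + 1) 1)
        = List.map
          (fun i => PySem.List.slice
              (c2 ++ List.map (fun j => -(vars + 1 + j)) (PySem.List.pyRange 1 (q + 1) 1))
              (some (i * (k - 1))) (some ((i + 1) * (k - 1))) ++ [vars + 1 + i + 1])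
          (PySem.List.pyRange 0 q 1) := by
      rw [show ((0:Int) + 1) = 1 by ring]
      rw [PySem.List.pyRange_one 1 (q + 1), PySem.List.pyRange_one 0 q]
      rw [show ((q + 1 - 1) : Int) = q by ring, show ((q - 0) : Int) = q by ring]
      simp only [List.map_map]
      apply List.map_congr_left
      intro x _
      simp only [Function.comp_apply, zero_add]
      have hx0 : (0:Int) ≤ (x : Int) * (k - 1) := mul_nonneg (by positivity) (by omega)
      have hx1 : (0:Int) ≤ ((x : Int) + 1) * (k - 1) := mul_nonneg (by positivity) (by omega)
      have e1 : ((1:Int) + x) * (k - 1) = ((List.take t clause).length : Int) + (x : Int) * (k - 1) := by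
        rw [hpreI]; ring
      have e2 : ((1:Int) + x + 1) * (k - 1) = ((List.take t clause).length : Int) + ((x:Int) + 1) * (k - 1) := by
        rw [hpreI]; ring
      rw [e1, e2, pv_slice_shift _ _ _ _ hx0 hx1]
      congr 2
      ring
    have hfin : PySem.List.slice
          (List.take t clause ++ (c2 ++ List.map (fun j => -(vars + 1 + j)) (PySem.List.pyRange 1 (q + 1) 1)))
          (some ((q + 1) * (k - 1))) none
        = PySem.List.slice
          (c2 ++ List.map (fun j => -(vars + 1 + j)) (PySem.List.pyRange 1 (q + 1) 1))
          (some (q * (k - 1))) none := by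
      have e3 : ((q + 1) * (k - 1)) = ((List.take t clause).length : Int) + q * (k - 1) := by
        rw [hpreI]; ring
      rw [e3, pv_slice_shift_from _ _ _ (mul_nonneg (by omega) (by omega))]
    rw [hhead, hmid, hfin]
    refine Prod.ext ?_ ?_
    · rfl
    · omega

theorem pv_loop_eq : ∀ (fuel : Nat) (clause : List Int) (k vars : Int) (acc : List (List Int)),
    clause.length ≤ fuel → (3 ≤ k ∨ (clause.length : Int) ≤ k) →
    kSATwhile fuel clause k vars acc =
      (acc ++ (encodeClause clause k vars).1, (encodeClause clause k vars).2) := by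
  intro fuel
  induction fuel with
  | zero =>
    intro clause k vars acc hf hp
    have hnil : clause = [] := List.eq_nil_of_length_eq_zero (by omega)
    subst hnil
    have hk0 : (0 : Int) ≤ k := by
      rcases hp with h | h
      · omega
      · simpa using h
    simp [kSATwhile, encodeClause, hk0]
  | succ fuel ih =>
    intro clause k vars acc hf hp
    by_cases hgt : ((clause.length : Int)) > k
    · have hk : 3 ≤ k := by
        rcases hp with h | h
        · exact h
        · omega
      simp only [kSATwhile]
      rw [if_pos hgt]
      have hs1 : PySem.List.slice clause none (some (k - 1)) = clause.take (k - 1).toNat :=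
        PySem.List.slice_to _ (by omega)
      have hs2 : PySem.List.slice clause (some (k - 1)) none = clause.drop (k - 1).toNat :=
        PySem.List.slice_from _ (by omega)
      simp only [reduceClause, hs1, hs2]
      have hlen2 : (clause.drop (k - 1).toNat ++ [-1 * (vars + 1)]).length ≤ fuel := by
        simp only [List.length_append, List.length_drop, List.length_cons, List.length_nil]
        omega
      rw [ih _ _ _ _ hlen2 (Or.inl hk)]
      rw [pv_unroll clause k vars hk hgt]
      simp [List.append_assoc]
    · simp only [kSATwhile]
      rw [if_neg hgt]
      have hle : ((clause.length : Int)) ≤ k := by omega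
      simp [encodeClause, hle]

theorem pv_fold_eq (k : Int) : ∀ (code : List (List Int)) (st : List (List Int) × Int),
    (∀ c ∈ code, 3 ≤ k ∨ (c.length : Int) ≤ k) →
    code.foldl (fun st clause => kSATwhile clause.length clause k st.2 st.1) st
      = code.foldl (fun st clause =>
          let r := encodeClause clause k st.2
          (st.1 ++ r.1, r.2)) st := by
  intro code
  induction code with
  | nil => intro st h; rfl
  | cons c cs ih =>
    intro st h
    simp only [List.foldl_cons]
    rw [pv_loop_eq c.length c k st.2 st.1 le_rfl (h c (by simp))]
    exact ih _ (fun c' hc' => h c' (by simp [hc']))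

-- ===== VERDICT (by name: the statement is the Claim_ definition above) =====
theorem k_SAT_spec : Claim_equal_k_SAT := by
  intro dim code k _ hpre
  unfold Spec_k_SAT k_SAT k_SAT_alt
  apply pv_fold_eq
  intro c hc
  rcases hpre with h | h
  · exact Or.inl h
  · exact Or.inr (h c hc)
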